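-- pv_equiv track=rewrite | github.com/udaytripurani/Grammar-Minimization | minimize/utils.py | remove_unproductive
-- ===== SOURCE A (Python) =====
-- def remove_unproductive(grammar):
--     productive = set()
--     changed = True
--
--     while changed:
--         changed = False
--         for non_terminal, rules in grammar.items():
--             if non_terminal not in productive:
--                 for rule in rules:
--                     if all([(symbol in productive) or (symbol == '') for symbol in rule]):
--                         productive.add(non_terminal)
--                         changed = True
--                         break
--
--     new_grammar = {non_terminal: rules for non_terminal, rules in grammar.items() if non_terminal in productive}
--
--     return new_grammar
-- ===== SOURCE B (Python) =====
-- def remove_unproductive(grammar):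
--     index = {}
--     productive = set()
--     queue = []
--     for nt, rules in grammar.items():
--         for rule in rules:
--             for ch in rule:
--                 index.setdefault(ch, []).append((nt, rule))
--         if nt not in productive and any(all(c in productive for c in rule) for rule in rules):
--             productive.add(nt)
--             queue.append(nt)
--     i = 0
--     while i < len(queue):
--         sym = queue[i]
--         i += 1
--         for nt, rule in index.get(sym, ()):
--             if nt not in productive and all(c in productive for c in rule):
--                 productive.add(nt)
--                 queue.append(nt)
--     return {nt: rules for nt, rules in grammar.items() if nt in productive}
-- ===== Notes on version B (the rewrite author's own statement) =====
-- stated objective: alternative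
-- what changed: A repeatedly re-scans the whole grammar until a pass adds no productive non-terminal; B makes one pass to build a symbol->(key,rule) reverse index and then propagates productivity with a FIFO worklist, rechecking only the rules that contain the symbol that just became productive.
import Mathlib
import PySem

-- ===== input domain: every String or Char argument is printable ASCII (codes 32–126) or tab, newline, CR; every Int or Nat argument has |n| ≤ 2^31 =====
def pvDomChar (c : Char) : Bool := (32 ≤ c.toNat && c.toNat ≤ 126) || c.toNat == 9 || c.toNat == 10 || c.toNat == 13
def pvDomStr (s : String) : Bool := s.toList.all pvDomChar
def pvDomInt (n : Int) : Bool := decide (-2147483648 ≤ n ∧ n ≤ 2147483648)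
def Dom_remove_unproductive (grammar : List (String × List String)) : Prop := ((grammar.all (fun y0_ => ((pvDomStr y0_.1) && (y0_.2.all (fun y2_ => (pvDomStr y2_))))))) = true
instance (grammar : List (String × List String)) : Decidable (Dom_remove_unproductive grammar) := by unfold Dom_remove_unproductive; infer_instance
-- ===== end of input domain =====

-- B replaces A's repeated full passes over the grammar by a one-pass worklist with a
-- symbol→(key,rule) reverse index; same return value, different traversal (objective: alternative).

-- ===== PORT A =====
-- `all([(symbol in productive) or (symbol == '') for symbol in rule])`
def symOkA (productive : List String) (symbol : Char) : Bool :=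
  productive.contains (String.ofList [symbol]) || (String.ofList [symbol] == "")

def goodRuleA (productive : List String) (rule : String) : Bool :=
  (rule.toList.map (symOkA productive)).all id

-- inner `for rule in rules: if …: add; break`
def findGoodA (productive : List String) : List String → Bool
  | [] => false
  | r :: rs => if goodRuleA productive r then true else findGoodA productive rs

-- one `for non_terminal, rules in grammar.items():` pass of the while-body
def passA : List (String × List String) → List String → Bool → List String × Bool
  | [], productive, changed => (productive, changed)
  | (k, rules) :: rest, productive, changed =>
    if productive.contains k then passA rest productive changed
    else if findGoodA productive rules then passA rest (PySem.Set.add productive k) true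
    else passA rest productive changed

-- `while changed:` — fuel only makes the loop total; grammar.length + 1 passes always suffice
def loopA (g : List (String × List String)) : Nat → List String → List String
  | 0, productive => productive
  | fuel+1, productive =>
    match passA g productive false with
    | (p', true) => loopA g fuel p'
    | (p', false) => p'

def remove_unproductive (grammar : List (String × List String)) : List (String × List String) :=
  let productive := loopA grammar (grammar.length + 1) []
  grammar.filter (fun kr => productive.contains kr.1)

-- ===== PORT B =====
def goodRuleB (productive : List String) (rule : String) : Bool :=
  rule.toList.all (fun c => productive.contains (String.ofList [c]))

-- `for ch in rule: index.setdefault(ch, []).append((nt, rule))`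
def addIndexB (k rule : String) (idx : PySem.Dict String (List (String × String))) :
    PySem.Dict String (List (String × String)) :=
  rule.toList.foldl
    (fun idx c => idx.insert (String.ofList [c]) (idx.getD (String.ofList [c]) [] ++ [(k, rule)])) idx

-- first loop of Source B: build the reverse index and the initial productive set / queue
def initB : List (String × List String) → PySem.Dict String (List (String × String)) →
    List String → List String →
    PySem.Dict String (List (String × String)) × List String × List String
  | [], idx, productive, queue => (idx, productive, queue)
  | (k, rules) :: rest, idx, productive, queue =>
    let idx' := rules.foldl (fun idx r => addIndexB k r idx) idx
    if !productive.contains k && rules.any (goodRuleB productive) then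
      initB rest idx' (PySem.Set.add productive k) (queue ++ [k])
    else initB rest idx' productive queue

-- inner `for nt, rule in index.get(sym, ()):`
def stepB : List (String × String) → List String → List String → List String × List String
  | [], productive, queue => (productive, queue)
  | (k, r) :: rest, productive, queue =>
    if !productive.contains k && goodRuleB productive r then
      stepB rest (PySem.Set.add productive k) (queue ++ [k])
    else stepB rest productive queue

-- `while i < len(queue):` as FIFO pop; fuel only makes it total (≤ grammar.length pops ever happen)
def loopB (idx : PySem.Dict String (List (String × String))) :
    Nat → List String → List String → List String
  | 0, productive, _ => productive
  | _+1, productive, [] => productive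
  | fuel+1, productive, sym :: rest =>
    let st := stepB (idx.getD sym []) productive rest
    loopB idx fuel st.1 st.2

def remove_unproductive_alt (grammar : List (String × List String)) : List (String × List String) :=
  let st := initB grammar PySem.Dict.empty [] []
  let productive := loopB st.1 grammar.length st.2.1 st.2.2
  grammar.filter (fun kr => productive.contains kr.1)

-- ===== PRECONDITION & SPEC =====
def Spec_remove_unproductive (grammar : List (String × List String)) (out : List (String × List String)) : Prop := out = remove_unproductive_alt grammar
instance (grammar : List (String × List String)) (out : List (String × List String)) : Decidable (Spec_remove_unproductive grammar out) := by unfold Spec_remove_unproductive; infer_instance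

-- ===== CLAIM (what is proved, stated in full; the proofs are below) =====
def Claim_equal_remove_unproductive : Prop := ∀ (grammar : List (String × List String)), Dom_remove_unproductive grammar → Spec_remove_unproductive grammar (remove_unproductive grammar)

-- ===== LEMMAS AND PROOFS =====

-- proof-only helpers: the least set of productive keys, soundness/closedness of a candidate set

def GoodP (P : List String) (r : String) : Prop := ∀ c ∈ r.toList, String.ofList [c] ∈ P

inductive ProductiveKey (g : List (String × List String)) : String → Prop
  | mk (k : String) (rules : List String) (r : String) :
      (k, rules) ∈ g → r ∈ rules →
      (∀ c ∈ r.toList, ProductiveKey g (String.ofList [c])) → ProductiveKey g k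

def SoundP (g : List (String × List String)) (P : List String) : Prop :=
  ∀ x ∈ P, ProductiveKey g x

def ClosedP (g : List (String × List String)) (P : List String) : Prop :=
  ∀ kr ∈ g, ∀ r ∈ kr.2, GoodP P r → kr.1 ∈ P

def Genuine (g : List (String × List String)) (e : String × String) : Prop :=
  ∃ rules, (e.1, rules) ∈ g ∧ e.2 ∈ rules

def missingC (g : List (String × List String)) (P : List String) : Nat :=
  ((g.map Prod.fst).toFinset.filter (fun k => k ∉ P)).card

lemma productive_mem (g : List (String × List String)) {P : List String} (hcl : ClosedP g P) :
    ∀ k, ProductiveKey g k → k ∈ P := by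
  intro k h
  induction h with
  | mk k rules r hg hr hch ih => exact hcl (k, rules) hg r hr (fun c hc => ih c hc)

lemma goodRuleB_iff (p : List String) (r : String) : goodRuleB p r = true ↔ GoodP p r := by
  simp [goodRuleB, GoodP, List.contains_iff_mem]

lemma goodRuleA_iff (p : List String) (r : String) : goodRuleA p r = true ↔ GoodP p r := by
  simp [goodRuleA, GoodP, symOkA, List.contains_iff_mem]

lemma findGoodA_iff (p : List String) (rs : List String) :
    findGoodA p rs = true ↔ ∃ r ∈ rs, GoodP p r := by
  induction rs with
  | nil => simp [findGoodA]
  | cons r rs ih =>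
    simp only [findGoodA]
    split_ifs with h
    · exact iff_of_true rfl ⟨r, List.mem_cons_self, (goodRuleA_iff p r).1 h⟩
    · rw [ih]
      constructor
      · rintro ⟨r', hr', hg⟩; exact ⟨r', List.mem_cons_of_mem _ hr', hg⟩
      · rintro ⟨r', hr', hg⟩
        rcases List.mem_cons.1 hr' with rfl | hr''
        · exact absurd ((goodRuleA_iff p r').2 hg) h
        · exact ⟨r', hr'', hg⟩

-- ===== A-side =====

lemma passA_subset : ∀ (l : List (String × List String)) (p : List String) (ch : Bool)
    {x : String}, x ∈ p → x ∈ (passA l p ch).1 := by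
  intro l
  induction l with
  | nil => intro p ch x hx; simpa [passA] using hx
  | cons kr rest ih =>
    intro p ch x hx
    obtain ⟨k, rules⟩ := kr
    simp only [passA]
    split_ifs with h1 h2
    · exact ih p ch hx
    · exact ih _ true (by rw [PySem.Set.mem_add]; exact Or.inl hx)
    · exact ih p ch hx

lemma passA_flag : ∀ (l : List (String × List String)) (p : List String),
    (passA l p true).2 = true := by
  intro l
  induction l with
  | nil => intro p; rfl
  | cons kr rest ih =>
    intro p
    obtain ⟨k, rules⟩ := kr
    simp only [passA]
    split_ifs <;> exact ih _

lemma passA_sound (g : List (String × List String)) :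
    ∀ (l : List (String × List String)), (∀ kr ∈ l, kr ∈ g) →
    ∀ (p : List String) (ch : Bool), SoundP g p → SoundP g (passA l p ch).1 := by
  intro l
  induction l with
  | nil => intro _ p ch hp; simpa [passA] using hp
  | cons kr rest ih =>
    intro hl p ch hp
    obtain ⟨k, rules⟩ := kr
    simp only [passA]
    split_ifs with h1 h2
    · exact ih (fun e he => hl e (List.mem_cons_of_mem _ he)) p ch hp
    · apply ih (fun e he => hl e (List.mem_cons_of_mem _ he))
      intro x hx
      rw [PySem.Set.mem_add] at hx
      rcases hx with hx | rfl
      · exact hp x hx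
      · obtain ⟨r, hr, hg⟩ := (findGoodA_iff p rules).1 h2
        exact ProductiveKey.mk x rules r (hl (x, rules) List.mem_cons_self) hr
          (fun c hc => hp _ (hg c hc))
    · exact ih (fun e he => hl e (List.mem_cons_of_mem _ he)) p ch hp

lemma passA_unchanged : ∀ (l : List (String × List String)) (p : List String),
    (passA l p false).2 = false →
    (passA l p false).1 = p ∧ ∀ kr ∈ l, kr.1 ∈ p ∨ findGoodA p kr.2 = false := by
  intro l
  induction l with
  | nil => intro p _; exact ⟨rfl, by simp⟩
  | cons kr rest ih =>
    intro p h
    obtain ⟨k, rules⟩ := kr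
    simp only [passA] at h ⊢
    split_ifs at h ⊢ with h1 h2
    · obtain ⟨hv, hrest⟩ := ih p h
      refine ⟨hv, ?_⟩
      intro e he
      rcases List.mem_cons.1 he with rfl | he'
      · exact Or.inl (List.contains_iff_mem.1 h1)
      · exact hrest e he'
    · have hfl := passA_flag rest (PySem.Set.add p k)
      rw [h] at hfl
      exact absurd hfl Bool.false_ne_true
    · obtain ⟨hv, hrest⟩ := ih p h
      refine ⟨hv, ?_⟩
      intro e he
      rcases List.mem_cons.1 he with rfl | he'
      · exact Or.inr (by simpa using h2)
      · exact hrest e he'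

lemma passA_changed : ∀ (l : List (String × List String)) (p : List String),
    (passA l p false).2 = true →
    ∃ k, k ∈ l.map Prod.fst ∧ k ∉ p ∧ k ∈ (passA l p false).1 := by
  intro l
  induction l with
  | nil => intro p h; simp [passA] at h
  | cons kr rest ih =>
    intro p h
    obtain ⟨k, rules⟩ := kr
    simp only [passA] at h ⊢
    split_ifs at h ⊢ with h1 h2
    · obtain ⟨k', h1', h2', h3'⟩ := ih p h
      exact ⟨k', by simp [h1'], h2', h3'⟩
    · refine ⟨k, by simp, ?_, ?_⟩
      · intro hk
        exact h1 (List.contains_iff_mem.2 hk)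
      · exact passA_subset rest _ true (by rw [PySem.Set.mem_add]; exact Or.inr rfl)
    · obtain ⟨k', h1', h2', h3'⟩ := ih p h
      exact ⟨k', by simp [h1'], h2', h3'⟩

lemma missing_lt (g : List (String × List String)) {p p' : List String}
    (hsub : ∀ x ∈ p, x ∈ p') {k : String}
    (hk : k ∈ g.map Prod.fst) (hknp : k ∉ p) (hkp' : k ∈ p') :
    missingC g p' < missingC g p := by
  apply Finset.card_lt_card
  constructor
  · intro x hx
    simp only [Finset.mem_filter] at hx ⊢
    exact ⟨hx.1, fun hxp => hx.2 (hsub x hxp)⟩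
  · intro hsup
    have hmem : k ∈ (g.map Prod.fst).toFinset.filter (fun k => k ∉ p') :=
      hsup (by simp only [Finset.mem_filter, List.mem_toFinset]; exact ⟨hk, hknp⟩)
    simp only [Finset.mem_filter] at hmem
    exact hmem.2 hkp'

lemma loopA_spec (g : List (String × List String)) :
    ∀ (fuel : Nat) (p : List String), SoundP g p → missingC g p < fuel →
      SoundP g (loopA g fuel p) ∧ ClosedP g (loopA g fuel p) := by
  intro fuel
  induction fuel with
  | zero => intro p _ h; omega
  | succ n ih =>
    intro p hs hm
    simp only [loopA]
    rcases hch : passA g p false with ⟨p', ch⟩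
    cases ch
    · simp only
      have hun := passA_unchanged g p (by rw [hch])
      rw [hch] at hun
      obtain ⟨hv, hrest⟩ := hun
      subst hv
      refine ⟨hs, ?_⟩
      intro kr hkr r hr hg
      rcases hrest kr hkr with hmem | hfg
      · exact hmem
      · exact absurd ((findGoodA_iff _ _).2 ⟨r, hr, hg⟩) (by rw [hfg]; simp)
    · simp only
      have hsnd := passA_sound g g (fun _ h => h) p false hs
      rw [hch] at hsnd
      obtain ⟨k, hk1, hk2, hk3⟩ := passA_changed g p (by rw [hch])
      rw [hch] at hk3
      have hsub : ∀ x ∈ p, x ∈ p' := by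
        intro x hx
        have := passA_subset g p false hx
        rwa [hch] at this
      have := missing_lt g hsub hk1 hk2 hk3
      exact ih p' hsnd (by omega)

-- ===== B-side: the reverse index =====

lemma idxFold_mono (k r : String) : ∀ (cs : List Char)
    (idx : PySem.Dict String (List (String × String))) (s : String) (e : String × String),
    e ∈ idx.getD s [] →
    e ∈ (cs.foldl (fun idx c =>
        idx.insert (String.ofList [c]) (idx.getD (String.ofList [c]) [] ++ [(k, r)])) idx).getD s [] := by
  intro cs
  induction cs with
  | nil => intro idx s e he; exact he
  | cons c cs ih =>
    intro idx s e he
    apply ih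
    by_cases hs : s = String.ofList [c]
    · subst hs
      rw [PySem.Dict.getD_insert_self]
      exact List.mem_append_left _ he
    · rw [PySem.Dict.getD_insert_of_ne _ _ _ hs]
      exact he

lemma idxFold_self (k r : String) : ∀ (cs : List Char)
    (idx : PySem.Dict String (List (String × String))) (c : Char), c ∈ cs →
    (k, r) ∈ (cs.foldl (fun idx c =>
        idx.insert (String.ofList [c]) (idx.getD (String.ofList [c]) [] ++ [(k, r)])) idx).getD (String.ofList [c]) [] := by
  intro cs
  induction cs with
  | nil => intro idx c hc; simp at hc
  | cons c0 cs ih =>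
    intro idx c hc
    rcases List.mem_cons.1 hc with rfl | hc'
    · have h1 : (k, r) ∈ (idx.insert (String.ofList [c])
          (idx.getD (String.ofList [c]) [] ++ [(k, r)])).getD (String.ofList [c]) [] := by
        rw [PySem.Dict.getD_insert_self]
        exact List.mem_append_right _ (by simp)
      simpa only [List.foldl_cons] using idxFold_mono k r cs _ _ _ h1
    · exact ih _ c hc'

lemma idxFold_sound (k r : String) : ∀ (cs : List Char)
    (idx : PySem.Dict String (List (String × String))) (s : String) (e : String × String),
    e ∈ (cs.foldl (fun idx c =>
        idx.insert (String.ofList [c]) (idx.getD (String.ofList [c]) [] ++ [(k, r)])) idx).getD s [] →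
    e ∈ idx.getD s [] ∨ e = (k, r) := by
  intro cs
  induction cs with
  | nil => intro idx s e he; exact Or.inl he
  | cons c cs ih =>
    intro idx s e he
    rcases ih _ s e he with hin | heq
    · by_cases hs : s = String.ofList [c]
      · subst hs
        rw [PySem.Dict.getD_insert_self] at hin
        rcases List.mem_append.1 hin with h | h
        · exact Or.inl h
        · simp at h; exact Or.inr h
      · rw [PySem.Dict.getD_insert_of_ne _ _ _ hs] at hin
        exact Or.inl hin
    · exact Or.inr heq

lemma rulesFold_mono (k : String) : ∀ (rules : List String)
    (idx : PySem.Dict String (List (String × String))) (s : String) (e : String × String),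
    e ∈ idx.getD s [] →
    e ∈ (rules.foldl (fun idx r => addIndexB k r idx) idx).getD s [] := by
  intro rules
  induction rules with
  | nil => intro idx s e he; exact he
  | cons r rules ih =>
    intro idx s e he
    exact ih _ s e (idxFold_mono k r r.toList idx s e he)

lemma rulesFold_self (k : String) : ∀ (rules : List String)
    (idx : PySem.Dict String (List (String × String))) (r : String), r ∈ rules →
    ∀ c ∈ r.toList,
    (k, r) ∈ (rules.foldl (fun idx r => addIndexB k r idx) idx).getD (String.ofList [c]) [] := by
  intro rules
  induction rules with
  | nil => intro idx r hr; simp at hr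
  | cons r0 rules ih =>
    intro idx r hr c hc
    rcases List.mem_cons.1 hr with rfl | hr'
    · exact rulesFold_mono k rules _ _ _ (idxFold_self k r r.toList idx c hc)
    · exact ih _ r hr' c hc

lemma rulesFold_sound (k : String) : ∀ (rules : List String)
    (idx : PySem.Dict String (List (String × String))) (s : String) (e : String × String),
    e ∈ (rules.foldl (fun idx r => addIndexB k r idx) idx).getD s [] →
    e ∈ idx.getD s [] ∨ ∃ r ∈ rules, e = (k, r) := by
  intro rules
  induction rules with
  | nil => intro idx s e he; exact Or.inl he
  | cons r rules ih =>
    intro idx s e he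
    rcases ih _ s e he with hin | ⟨r', hr', heq⟩
    · rcases idxFold_sound k r r.toList idx s e hin with h | h
      · exact Or.inl h
      · exact Or.inr ⟨r, List.mem_cons_self, h⟩
    · exact Or.inr ⟨r', List.mem_cons_of_mem _ hr', heq⟩

-- ===== B-side: the first loop (initB) =====

lemma initB_pq : ∀ (l : List (String × List String))
    (idx : PySem.Dict String (List (String × String))) (p : List String),
    (initB l idx p p).2.1 = (initB l idx p p).2.2 := by
  intro l
  induction l with
  | nil => intro idx p; rfl
  | cons kr rest ih =>
    intro idx p
    obtain ⟨k, rules⟩ := kr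
    simp only [initB]
    split_ifs with h
    · have hk : k ∉ p := by
        have hcf := (Bool.and_eq_true_iff.1 h).1
        simp only [Bool.not_eq_true', List.contains_iff_mem] at hcf
        simpa using hcf
      rw [PySem.Set.add_of_not_mem hk]
      exact ih _ _
    · exact ih _ _

lemma initB_p_mono : ∀ (l : List (String × List String))
    (idx : PySem.Dict String (List (String × String))) (p q : List String)
    {x : String}, x ∈ p → x ∈ (initB l idx p q).2.1 := by
  intro l
  induction l with
  | nil => intro idx p q x hx; exact hx
  | cons kr rest ih =>
    intro idx p q x hx
    obtain ⟨k, rules⟩ := kr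
    simp only [initB]
    split_ifs with h
    · exact ih _ _ _ (by rw [PySem.Set.mem_add]; exact Or.inl hx)
    · exact ih _ _ _ hx

lemma initB_sound (g : List (String × List String)) :
    ∀ (l : List (String × List String)), (∀ kr ∈ l, kr ∈ g) →
    ∀ (idx : PySem.Dict String (List (String × String))) (p q : List String),
    SoundP g p → SoundP g (initB l idx p q).2.1 := by
  intro l
  induction l with
  | nil => intro _ idx p q hp; exact hp
  | cons kr rest ih =>
    intro hl idx p q hp
    obtain ⟨k, rules⟩ := kr
    simp only [initB]
    split_ifs with h
    · apply ih (fun e he => hl e (List.mem_cons_of_mem _ he))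
      intro x hx
      rw [PySem.Set.mem_add] at hx
      rcases hx with hx | rfl
      · exact hp x hx
      · obtain ⟨r, hr, hg⟩ := List.any_eq_true.1 (Bool.and_eq_true_iff.1 h).2
        exact ProductiveKey.mk x rules r (hl (x, rules) List.mem_cons_self) hr
          (fun c hc => hp _ ((goodRuleB_iff p r).1 hg c hc))
    · exact ih (fun e he => hl e (List.mem_cons_of_mem _ he)) _ _ _ hp

lemma initB_p_sub : ∀ (l : List (String × List String))
    (idx : PySem.Dict String (List (String × String))) (p q : List String)
    (x : String), x ∈ (initB l idx p q).2.1 → x ∈ p ∨ x ∈ l.map Prod.fst := by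
  intro l
  induction l with
  | nil => intro idx p q x hx; exact Or.inl hx
  | cons kr rest ih =>
    intro idx p q x hx
    obtain ⟨k, rules⟩ := kr
    simp only [initB] at hx
    split_ifs at hx with h
    · rcases ih _ _ _ x hx with hin | hin
      · rw [PySem.Set.mem_add] at hin
        rcases hin with hin | rfl
        · exact Or.inl hin
        · exact Or.inr (by simp)
      · exact Or.inr (by simp [hin])
    · rcases ih _ _ _ x hx with hin | hin
      · exact Or.inl hin
      · exact Or.inr (by simp [hin])

lemma initB_nodup : ∀ (l : List (String × List String))
    (idx : PySem.Dict String (List (String × String))) (p q : List String),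
    p.Nodup → (initB l idx p q).2.1.Nodup := by
  intro l
  induction l with
  | nil => intro idx p q hp; exact hp
  | cons kr rest ih =>
    intro idx p q hp
    obtain ⟨k, rules⟩ := kr
    simp only [initB]
    split_ifs with h
    · exact ih _ _ _ (PySem.Set.nodup_add p k hp)
    · exact ih _ _ _ hp

lemma initB_idx_mono : ∀ (l : List (String × List String))
    (idx : PySem.Dict String (List (String × String))) (p q : List String)
    (s : String) (e : String × String), e ∈ idx.getD s [] → e ∈ (initB l idx p q).1.getD s [] := by
  intro l
  induction l with
  | nil => intro idx p q s e he; exact he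
  | cons kr rest ih =>
    intro idx p q s e he
    obtain ⟨k, rules⟩ := kr
    simp only [initB]
    split_ifs with h
    · exact ih _ _ _ s e (rulesFold_mono k rules idx s e he)
    · exact ih _ _ _ s e (rulesFold_mono k rules idx s e he)

lemma initB_idx_sound (g : List (String × List String)) :
    ∀ (l : List (String × List String)), (∀ kr ∈ l, kr ∈ g) →
    ∀ (idx : PySem.Dict String (List (String × String))) (p q : List String),
    (∀ s e, e ∈ idx.getD s [] → Genuine g e) →
    ∀ s e, e ∈ (initB l idx p q).1.getD s [] → Genuine g e := by
  intro l
  induction l with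
  | nil => intro _ idx p q hidx s e he; exact hidx s e he
  | cons kr rest ih =>
    intro hl idx p q hidx s e he
    obtain ⟨k, rules⟩ := kr
    have hstep : ∀ s e, e ∈ (rules.foldl (fun idx r => addIndexB k r idx) idx).getD s [] →
        Genuine g e := by
      intro s e he'
      rcases rulesFold_sound k rules idx s e he' with h | ⟨r, hr, rfl⟩
      · exact hidx s e h
      · exact ⟨rules, hl (k, rules) List.mem_cons_self, hr⟩
    simp only [initB] at he
    split_ifs at he with h
    · exact ih (fun e' he' => hl e' (List.mem_cons_of_mem _ he')) _ _ _ hstep s e he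
    · exact ih (fun e' he' => hl e' (List.mem_cons_of_mem _ he')) _ _ _ hstep s e he

lemma initB_idx_complete : ∀ (l : List (String × List String))
    (idx : PySem.Dict String (List (String × String))) (p q : List String)
    (k : String) (rules : List String), (k, rules) ∈ l → ∀ r ∈ rules, ∀ c ∈ r.toList,
    (k, r) ∈ (initB l idx p q).1.getD (String.ofList [c]) [] := by
  intro l
  induction l with
  | nil => intro idx p q k rules h; simp at h
  | cons kr rest ih =>
    intro idx p q k rules hmem r hr c hc
    obtain ⟨k0, rules0⟩ := kr
    rcases List.mem_cons.1 hmem with heq | hmem'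
    · simp only [Prod.mk.injEq] at heq
      obtain ⟨rfl, rfl⟩ := heq
      simp only [initB]
      split_ifs with h
      · exact initB_idx_mono rest _ _ _ _ _ (rulesFold_self k rules idx r hr c hc)
      · exact initB_idx_mono rest _ _ _ _ _ (rulesFold_self k rules idx r hr c hc)
    · simp only [initB]
      split_ifs with h
      · exact ih _ _ _ k rules hmem' r hr c hc
      · exact ih _ _ _ k rules hmem' r hr c hc

lemma initB_empty_closed : ∀ (l : List (String × List String))
    (idx : PySem.Dict String (List (String × String))) (p q : List String)
    (k : String) (rules : List String), (k, rules) ∈ l → ∀ r ∈ rules, r.toList = [] →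
    k ∈ (initB l idx p q).2.1 := by
  intro l
  induction l with
  | nil => intro idx p q k rules h; simp at h
  | cons kr rest ih =>
    intro idx p q k rules hmem r hr hnil
    obtain ⟨k0, rules0⟩ := kr
    rcases List.mem_cons.1 hmem with heq | hmem'
    · simp only [Prod.mk.injEq] at heq
      obtain ⟨rfl, rfl⟩ := heq
      have hany : rules.any (goodRuleB p) = true :=
        List.any_eq_true.2 ⟨r, hr, by simp [goodRuleB, hnil]⟩
      simp only [initB]
      split_ifs with h
      · exact initB_p_mono rest _ _ _ (by rw [PySem.Set.mem_add]; exact Or.inr rfl)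
      · have hk : k ∈ p := by
          by_contra hkp
          apply h
          simp only [Bool.and_eq_true, Bool.not_eq_eq_eq_not, Bool.not_true]
          exact ⟨by simpa [List.contains_iff_mem] using hkp, hany⟩
        exact initB_p_mono rest _ _ _ hk
    · simp only [initB]
      split_ifs with h
      · exact ih _ _ _ k rules hmem' r hr hnil
      · exact ih _ _ _ k rules hmem' r hr hnil

-- ===== B-side: the worklist loop =====

lemma stepB_sound (g : List (String × List String)) :
    ∀ (L : List (String × String)), (∀ e ∈ L, Genuine g e) →
    ∀ (p q : List String), SoundP g p → SoundP g (stepB L p q).1 := by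
  intro L
  induction L with
  | nil => intro _ p q hp; exact hp
  | cons e rest ih =>
    intro hL p q hp
    obtain ⟨k, r⟩ := e
    simp only [stepB]
    split_ifs with h
    · apply ih (fun e' he' => hL e' (List.mem_cons_of_mem _ he'))
      intro x hx
      rw [PySem.Set.mem_add] at hx
      rcases hx with hx | rfl
      · exact hp x hx
      · obtain ⟨rules, hgm, hrm⟩ := hL (x, r) List.mem_cons_self
        exact ProductiveKey.mk x rules r hgm hrm
          (fun c hc => hp _ ((goodRuleB_iff p r).1 (Bool.and_eq_true_iff.1 h).2 c hc))
    · exact ih (fun e' he' => hL e' (List.mem_cons_of_mem _ he')) p q hp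

lemma stepB_spec : ∀ (L : List (String × String)) (p q : List String),
    ∃ extra : List String,
      (stepB L p q).2 = q ++ extra ∧
      (∀ x, x ∈ (stepB L p q).1 ↔ x ∈ p ∨ x ∈ extra) ∧
      extra.Nodup ∧
      (∀ x ∈ extra, x ∉ p ∧ ∃ r, (x, r) ∈ L) ∧
      (∀ e ∈ L, GoodP (stepB L p q).1 e.2 →
        e.1 ∈ (stepB L p q).1 ∨ ∃ c ∈ e.2.toList, String.ofList [c] ∈ extra) := by
  intro L
  induction L with
  | nil =>
    intro p q
    exact ⟨[], by simp [stepB], by simp [stepB], List.nodup_nil, by simp, by simp⟩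
  | cons e rest ih =>
    intro p q
    obtain ⟨k, r⟩ := e
    simp only [stepB]
    split_ifs with h
    · have hk : k ∉ p := by
        have hcf := (Bool.and_eq_true_iff.1 h).1
        simp only [Bool.not_eq_true', List.contains_iff_mem] at hcf
        simpa using hcf
      have hadd : PySem.Set.add p k = p ++ [k] := PySem.Set.add_of_not_mem hk
      obtain ⟨extra, h1, h2, h3, h4, h5⟩ := ih (PySem.Set.add p k) (q ++ [k])
      refine ⟨k :: extra, ?_, ?_, ?_, ?_, ?_⟩
      · rw [h1]; simp
      · intro x
        rw [h2 x, PySem.Set.mem_add]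
        constructor
        · rintro ((hx | rfl) | hx)
          · exact Or.inl hx
          · exact Or.inr List.mem_cons_self
          · exact Or.inr (List.mem_cons_of_mem _ hx)
        · rintro (hx | hx)
          · exact Or.inl (Or.inl hx)
          · rcases List.mem_cons.1 hx with rfl | hx'
            · exact Or.inl (Or.inr rfl)
            · exact Or.inr hx'
      · refine List.nodup_cons.2 ⟨?_, h3⟩
        intro hke
        exact (h4 k hke).1 (by rw [PySem.Set.mem_add]; exact Or.inr rfl)
      · intro x hx
        rcases List.mem_cons.1 hx with rfl | hx'
        · exact ⟨hk, r, List.mem_cons_self⟩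
        · obtain ⟨hxp, r', hr'⟩ := h4 x hx'
          refine ⟨fun hxp' => hxp (by rw [PySem.Set.mem_add]; exact Or.inl hxp'), r',
            List.mem_cons_of_mem _ hr'⟩
      · intro e he hg
        rcases List.mem_cons.1 he with rfl | he'
        · exact Or.inl ((h2 k).2 (Or.inl (by rw [PySem.Set.mem_add]; exact Or.inr rfl)))
        · rcases h5 e he' hg with hin | ⟨c, hc, hce⟩
          · exact Or.inl hin
          · exact Or.inr ⟨c, hc, List.mem_cons_of_mem _ hce⟩
    · obtain ⟨extra, h1, h2, h3, h4, h5⟩ := ih p q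
      refine ⟨extra, h1, h2, h3, ?_, ?_⟩
      · intro x hx
        obtain ⟨hxp, r', hr'⟩ := h4 x hx
        exact ⟨hxp, r', List.mem_cons_of_mem _ hr'⟩
      intro e he hg
      rcases List.mem_cons.1 he with rfl | he'
      · by_cases hc : p.contains k = true
        · exact Or.inl ((h2 k).2 (Or.inl (List.contains_iff_mem.1 hc)))
        · have hcb : p.contains k = false := Bool.eq_false_iff.2 hc
          have hgf : ¬ GoodP p r := fun hgp => h (by
            rw [Bool.and_eq_true_iff]
            exact ⟨by rw [hcb]; rfl, (goodRuleB_iff p r).2 hgp⟩)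
          have : ∃ c ∈ r.toList, String.ofList [c] ∉ p := by
            by_contra hcon
            push_neg at hcon
            exact hgf hcon
          obtain ⟨c, hcm, hcnp⟩ := this
          have hcin := hg c hcm
          rw [h2] at hcin
          exact Or.inr ⟨c, hcm, hcin.resolve_left hcnp⟩
      · exact h5 e he' hg

lemma missing_extra (g : List (String × List String)) {p p' extra : List String}
    (hiff : ∀ x, x ∈ p' ↔ x ∈ p ∨ x ∈ extra) (hnd : extra.Nodup)
    (hnp : ∀ x ∈ extra, x ∉ p) (hkeys : ∀ x ∈ extra, x ∈ g.map Prod.fst) :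
    missingC g p' + extra.length = missingC g p := by
  have hE : extra.toFinset ⊆ (g.map Prod.fst).toFinset.filter (fun k => k ∉ p) := by
    intro x hx
    rw [List.mem_toFinset] at hx
    simp only [Finset.mem_filter, List.mem_toFinset]
    exact ⟨hkeys x hx, hnp x hx⟩
  have hset : (g.map Prod.fst).toFinset.filter (fun k => k ∉ p') =
      ((g.map Prod.fst).toFinset.filter (fun k => k ∉ p)) \ extra.toFinset := by
    ext x
    simp only [Finset.mem_filter, Finset.mem_sdiff, List.mem_toFinset, hiff x]
    tauto
  have hcard := Finset.card_le_card hE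
  rw [missingC, missingC, hset, Finset.card_sdiff, Finset.inter_eq_left.mpr hE,
    List.toFinset_card_of_nodup hnd]
  rw [List.toFinset_card_of_nodup hnd] at hcard
  omega

def Cinv (g : List (String × List String)) (p q : List String) : Prop :=
  ∀ kr ∈ g, ∀ r ∈ kr.2, GoodP p r → kr.1 ∈ p ∨ ∃ c ∈ r.toList, String.ofList [c] ∈ q

lemma loopB_spec (g : List (String × List String))
    (idx : PySem.Dict String (List (String × String)))
    (hidx_sound : ∀ s e, e ∈ idx.getD s [] → Genuine g e)
    (hidx_comp : ∀ kr ∈ g, ∀ r ∈ kr.2, ∀ c ∈ r.toList,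
      (kr.1, r) ∈ idx.getD (String.ofList [c]) []) :
    ∀ (fuel : Nat) (p q : List String), SoundP g p → Cinv g p q →
      q.length + missingC g p ≤ fuel →
      SoundP g (loopB idx fuel p q) ∧ ClosedP g (loopB idx fuel p q) := by
  intro fuel
  induction fuel with
  | zero =>
    intro p q hs hc hf
    have hq : q = [] := by
      cases q with
      | nil => rfl
      | cons a b => simp at hf
    subst hq
    refine ⟨hs, ?_⟩
    intro kr hkr r hr hg
    rcases hc kr hkr r hr hg with h | ⟨c, _, hcq⟩
    · exact h
    · simp at hcq
  | succ n ih =>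
    intro p q hs hc hf
    cases q with
    | nil =>
      simp only [loopB]
      refine ⟨hs, ?_⟩
      intro kr hkr r hr hg
      rcases hc kr hkr r hr hg with h | ⟨c, _, hcq⟩
      · exact h
      · simp at hcq
    | cons sym rest =>
      simp only [loopB]
      obtain ⟨extra, h1, h2, h3, h4, h5⟩ := stepB_spec (idx.getD sym []) p rest
      have hkeys : ∀ x ∈ extra, x ∈ g.map Prod.fst := by
        intro x hx
        obtain ⟨_, r', hxr⟩ := h4 x hx
        obtain ⟨rules, hgm, _⟩ := hidx_sound sym (x, r') hxr
        exact List.mem_map.2 ⟨(x, rules), hgm, rfl⟩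
      have harith := missing_extra g h2 h3 (fun x hx => (h4 x hx).1) hkeys
      apply ih
      · exact stepB_sound g _ (fun e he => hidx_sound sym e he) p rest hs
      · intro kr hkr r hr hgood
        by_cases hgp : GoodP p r
        · rcases hc kr hkr r hr hgp with hmem | ⟨c, hcr, hcq⟩
          · exact Or.inl ((h2 kr.1).2 (Or.inl hmem))
          · rcases List.mem_cons.1 hcq with hsym | hrest
            · have hin : (kr.1, r) ∈ idx.getD sym [] := by
                rw [← hsym]
                exact hidx_comp kr hkr r hr c hcr
              rcases h5 (kr.1, r) hin hgood with hmem | ⟨c', hc', hce⟩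
              · exact Or.inl hmem
              · exact Or.inr ⟨c', hc', by rw [h1]; exact List.mem_append_right _ hce⟩
            · exact Or.inr ⟨c, hcr, by rw [h1]; exact List.mem_append_left _ hrest⟩
        · have : ∃ c ∈ r.toList, String.ofList [c] ∉ p := by
            by_contra hcon
            push_neg at hcon
            exact hgp hcon
          obtain ⟨c, hcr, hcnp⟩ := this
          have hcp1 := hgood c hcr
          rw [h2] at hcp1
          exact Or.inr ⟨c, hcr, by rw [h1]; exact List.mem_append_right _ (hcp1.resolve_left hcnp)⟩
      · rw [h1]
        simp only [List.length_append, List.length_cons] at hf ⊢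
        omega

-- ===== VERDICT (by name: the statement is the Claim_ definition above) =====
theorem remove_unproductive_spec : Claim_equal_remove_unproductive := by
  unfold Claim_equal_remove_unproductive
  intro g _
  unfold Spec_remove_unproductive
  -- A's saturation result is sound and closed
  have hA : SoundP g (loopA g (g.length + 1) []) ∧ ClosedP g (loopA g (g.length + 1) []) := by
    apply loopA_spec
    · intro x hx; simp at hx
    · have h1 : missingC g [] ≤ (g.map Prod.fst).toFinset.card := Finset.card_filter_le _ _
      have h2 : (g.map Prod.fst).toFinset.card ≤ (g.map Prod.fst).length := List.toFinset_card_le _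
      simp only [List.length_map] at h2
      omega
  -- B's worklist result is sound and closed
  have hpq := initB_pq g PySem.Dict.empty []
  have hempty : ∀ (s : String) (e : String × String),
      e ∈ (PySem.Dict.empty : PySem.Dict String (List (String × String))).getD s [] →
        Genuine g e := by
    intro s e he
    simp [PySem.Dict.getD, PySem.Dict.empty, PySem.Dict.get?] at he
  set st := initB g PySem.Dict.empty [] [] with hst
  have hidx_sound : ∀ s e, e ∈ st.1.getD s [] → Genuine g e :=
    initB_idx_sound g g (fun _ h => h) _ _ _ hempty
  have hidx_comp : ∀ kr ∈ g, ∀ r ∈ kr.2, ∀ c ∈ r.toList,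
      (kr.1, r) ∈ st.1.getD (String.ofList [c]) [] := by
    intro kr hkr r hr c hc
    exact initB_idx_complete g PySem.Dict.empty [] [] kr.1 kr.2
      (by rwa [Prod.mk.eta]) r hr c hc
  have hp0_sound : SoundP g st.2.1 :=
    initB_sound g g (fun _ h => h) _ _ _ (fun x hx => absurd hx (by simp))
  have hp0_sub : ∀ x ∈ st.2.1, x ∈ g.map Prod.fst := by
    intro x hx
    rcases initB_p_sub g PySem.Dict.empty [] [] x hx with h | h
    · simp at h
    · exact h
  have hp0_nodup : st.2.1.Nodup := initB_nodup g PySem.Dict.empty [] [] List.nodup_nil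
  have hcinv : Cinv g st.2.1 st.2.2 := by
    intro kr hkr r hr hg
    rcases hrl : r.toList with _ | ⟨c, cs⟩
    · exact Or.inl (initB_empty_closed g PySem.Dict.empty [] [] kr.1 kr.2
        (by rwa [Prod.mk.eta]) r hr hrl)
    · refine Or.inr ⟨c, List.mem_cons_self, ?_⟩
      rw [← hpq]
      exact hg c (by rw [hrl]; exact List.mem_cons_self)
  have hfuel : st.2.2.length + missingC g st.2.1 ≤ g.length := by
    rw [← hpq]
    have hcard : st.2.1.toFinset.card = st.2.1.length := List.toFinset_card_of_nodup hp0_nodup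
    have hsub : st.2.1.toFinset ⊆ (g.map Prod.fst).toFinset.filter (fun k => k ∈ st.2.1) := by
      intro x hx
      rw [List.mem_toFinset] at hx
      simp only [Finset.mem_filter, List.mem_toFinset]
      exact ⟨hp0_sub x hx, hx⟩
    have h1 : st.2.1.length ≤ ((g.map Prod.fst).toFinset.filter (fun k => k ∈ st.2.1)).card := by
      rw [← hcard]; exact Finset.card_le_card hsub
    have h2 := Finset.filter_card_add_filter_neg_card_eq_card
      (s := (g.map Prod.fst).toFinset) (p := fun k => k ∈ st.2.1)
    have h3 : (g.map Prod.fst).toFinset.card ≤ g.length := by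
      have := List.toFinset_card_le (g.map Prod.fst)
      simpa using this
    unfold missingC
    omega
  have hB := loopB_spec g st.1 hidx_sound hidx_comp g.length st.2.1 st.2.2 hp0_sound hcinv hfuel
  -- the two productive sets have the same members, so the two filters agree
  have hiff : ∀ x, x ∈ loopA g (g.length + 1) [] ↔ x ∈ loopB st.1 g.length st.2.1 st.2.2 := by
    intro x
    constructor
    · intro hx; exact productive_mem g hB.2 x (hA.1 x hx)
    · intro hx; exact productive_mem g hA.2 x (hB.1 x hx)
  have hcont : ∀ x : String,
      (loopA g (g.length + 1) []).contains x = (loopB st.1 g.length st.2.1 st.2.2).contains x := by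
    intro x
    by_cases hx : x ∈ loopA g (g.length + 1) []
    · rw [List.contains_iff_mem.mpr hx, List.contains_iff_mem.mpr ((hiff x).1 hx)]
    · have hL : (loopA g (g.length + 1) []).contains x = false :=
        Bool.eq_false_iff.2 (fun hc => hx (List.contains_iff_mem.1 hc))
      have hR : (loopB st.1 g.length st.2.1 st.2.2).contains x = false :=
        Bool.eq_false_iff.2 (fun hc => hx ((hiff x).2 (List.contains_iff_mem.1 hc)))
      rw [hL, hR]
  show remove_unproductive g = remove_unproductive_alt g
  unfold remove_unproductive remove_unproductive_alt
  rw [← hst]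
  exact List.filter_congr (fun kr _ => hcont kr.1)
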